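-- pv_equiv track=rewrite | github.com/suhjaesuk/codingtest.py | thisiscodingtest/Q1_모험가길드.py | solution
-- ===== SOURCE A (Python) =====
-- def solution(fears):
--     answer = 0
--     fears_dict = {}
--     for i in fears:
--         if i in fears_dict:
--             fears_dict[i] += 1
--         else:
--             fears_dict[i] = 1
--
--     for i in fears_dict:
--         if fears_dict[i] >= i:
--             answer += 1
--
--     return answer
-- ===== SOURCE B (Python) =====
-- def solution(fears):
--     # sort then scan consecutive equal-value runs; count runs whose length >= value
--     s = sorted(fears)
--     answer = 0
--     i = 0
--     n = len(s)
--     while i < n: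
--         j = i + 1
--         while j < n and s[j] == s[i]:
--             j += 1
--         if j - i >= s[i]:
--             answer += 1
--         i = j
--     return answer
-- ===== Notes on version B (the rewrite author's own statement) =====
-- stated objective: alternative
-- what changed: Replaced the hash-map frequency table plus key scan with sort-then-run-length: sort a copy and scan consecutive equal-value runs, counting runs whose length >= value.
import Mathlib
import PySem

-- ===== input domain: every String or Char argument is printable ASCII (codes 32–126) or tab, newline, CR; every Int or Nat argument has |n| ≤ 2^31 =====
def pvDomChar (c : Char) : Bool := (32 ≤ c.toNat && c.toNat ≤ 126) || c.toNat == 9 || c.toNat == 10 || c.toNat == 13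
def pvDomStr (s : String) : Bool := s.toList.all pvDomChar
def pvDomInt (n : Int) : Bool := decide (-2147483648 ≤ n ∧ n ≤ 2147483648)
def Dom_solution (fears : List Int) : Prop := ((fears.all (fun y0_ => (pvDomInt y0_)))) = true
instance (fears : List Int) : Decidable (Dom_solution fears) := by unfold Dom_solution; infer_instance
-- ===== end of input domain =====

-- B replaces A's hash-map frequency table + key scan by a sort-then-run-length scan (alternative algorithm, same result).

-- ===== PORT A =====
-- literal port of A: build a frequency dict by a membership-tested loop, then count keys with freq >= key
def solution (fears : List Int) : Int :=
  let d := fears.foldl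
    (fun d i => if d.contains i then d.insert i (d.getD i 0 + 1) else d.insert i 1)
    PySem.Dict.empty
  d.keys.foldl (fun answer i => if d.getD i 0 ≥ i then answer + 1 else answer) (0 : Int)

-- ===== PORT B =====
-- port of B's outer while-loop over the sorted list: each step consumes one run of equal values
-- (the inner `while j < n and s[j] == s[i]` is the takeWhile computing the run length j - i)
def solutionAltLoop : List Int → Int → Int
  | [], answer => answer
  | v :: rest, answer =>
    let k := (rest.takeWhile (fun x => x == v)).length
    solutionAltLoop (rest.drop k)
      (if (1 + (k : Int)) ≥ v then answer + 1 else answer)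
termination_by l _ => l.length
decreasing_by
  simp only [List.length_drop, List.length_cons]
  omega

def solution_alt (fears : List Int) : Int :=
  solutionAltLoop (PySem.List.sorted fears (fun x => x) false) 0

-- ===== PRECONDITION & SPEC =====
def Spec_solution (fears : List Int) (out : Int) : Prop := out = solution_alt fears
instance (fears : List Int) (out : Int) : Decidable (Spec_solution fears out) := by unfold Spec_solution; infer_instance

-- ===== CLAIM (what is proved, stated in full; the proofs are below) =====
def Claim_equal_solution : Prop := ∀ (fears : List Int), Dom_solution fears → Spec_solution fears (solution fears)

-- ===== LEMMAS AND PROOFS =====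

-- A computes: over the distinct values of fears, count those v with count(v) ≥ v
theorem solution_eq_countP (fears : List Int) :
    solution fears =
      ((PySem.Set.ofList fears).countP (fun v => decide (v ≤ (fears.count v : Int))) : Int) := by
  unfold solution
  have hfun : (fun (d : PySem.Dict Int Int) i => if d.contains i then d.insert i (d.getD i 0 + 1) else d.insert i 1)
      = fun d i => d.insert i (d.getD i 0 + 1) := by
    funext d i
    by_cases h : d.contains i = true
    · simp [h]
    · have hg : d.get? i = none := by
        have := PySem.Dict.contains_eq_isSome_get? (d := d) (k := i)
        simp [h] at this
        exact Option.not_isSome_iff_eq_none.mp (by simp [← this])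
      simp [h, PySem.Dict.getD, hg]
  simp only [hfun, PySem.Dict.foldl_insert_getD_add_one_eq_counter]
  rw [PySem.List.foldl_ite_add_one]
  rw [PySem.Dict.keys_counter]
  simp [PySem.Dict.getD_counter, ge_iff_le]

-- after dropWhile (== v) on a sorted tail everything exceeds v, hence v is gone
theorem not_mem_dropWhile_run (v : Int) (rest : List Int)
    (hv : ∀ x ∈ rest, v ≤ x) (hp : rest.Pairwise (· ≤ ·)) :
    v ∉ rest.dropWhile (fun x => x == v) := by
  induction rest with
  | nil => simp
  | cons w rest' ih =>
    rw [List.dropWhile_cons]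
    by_cases hw : w = v
    · simp only [hw, beq_self_eq_true]
      exact ih (fun x hx => hv x (List.mem_cons_of_mem _ hx)) (List.pairwise_cons.mp hp).2
    · have : (w == v) = false := by simp [hw]
      simp only [this, if_neg Bool.false_ne_true]
      intro hmem
      rcases List.mem_cons.mp hmem with h1 | h2
      · exact hw h1.symm
      · have hvw : v ≤ w := hv w (List.mem_cons_self)
        have hwv : w ≤ v := (List.pairwise_cons.mp hp).1 v h2
        exact hw (le_antisymm hwv hvw)

-- B's loop over a sorted list counts, over the distinct values, those v with count(v) ≥ v
theorem altLoop_eq_countP : ∀ (n : Nat) (s : List Int), s.length ≤ n → s.Pairwise (· ≤ ·) →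
    ∀ (answer : Int),
      solutionAltLoop s answer =
        answer + ((PySem.List.dedup s).countP (fun v => decide (v ≤ (s.count v : Int))) : Int) := by
  intro n
  induction n with
  | zero =>
    intro s hs _ answer
    have : s = [] := List.length_eq_zero_iff.mp (Nat.le_zero.mp hs)
    subst this
    simp [solutionAltLoop, PySem.List.dedup_eq_ofList, PySem.Set.ofList_nil]
  | succ n ih =>
    intro s hs hp answer
    match s with
    | [] => simp [solutionAltLoop, PySem.List.dedup_eq_ofList, PySem.Set.ofList_nil]
    | v :: rest =>
      have hv : ∀ x ∈ rest, v ≤ x := fun x hx => (List.pairwise_cons.mp hp).1 x hx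
      have hpr : rest.Pairwise (· ≤ ·) := (List.pairwise_cons.mp hp).2
      set t := rest.takeWhile (fun x => x == v) with ht
      set u := rest.dropWhile (fun x => x == v) with hu
      have hdrop : rest.drop t.length = u := by
        conv_lhs => rw [← List.takeWhile_append_dropWhile (p := fun x => x == v) (l := rest)]
        rw [← ht, ← hu, List.drop_left]
      have htv : ∀ x ∈ t, x = v := by
        intro x hx
        have := List.mem_takeWhile_imp hx
        exact eq_of_beq this
      have hvu : v ∉ u := not_mem_dropWhile_run v rest hv hpr
      have hpu : u.Pairwise (· ≤ ·) := hpr.sublist (List.dropWhile_sublist _)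
      have hrest : rest = t ++ u := (List.takeWhile_append_dropWhile).symm
      have hcountv : (v :: rest).count v = t.length + 1 := by
        rw [hrest]
        simp only [List.count_cons, List.count_append]
        have h1 : t.count v = t.length := List.count_eq_length.mpr (fun b hb => by
          rw [htv b hb])
        have h2 : u.count v = 0 := List.count_eq_zero.mpr hvu
        simp [h1, h2]
      have hcountu : ∀ x ∈ u, (v :: rest).count x = u.count x := by
        intro x hx
        have hxv : x ≠ v := fun h => hvu (h ▸ hx)
        rw [hrest]
        simp only [List.count_cons, List.count_append]
        have h1 : t.count x = 0 := List.count_eq_zero.mpr (fun hmem => hxv (htv x hmem))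
        simp [h1, beq_iff_eq, Ne.symm hxv]
      have hnd1 : (PySem.List.dedup (v :: rest)).Nodup := by
        simp only [PySem.List.dedup_eq_ofList]; exact PySem.Set.nodup_ofList _
      have hnd2 : (v :: PySem.List.dedup u).Nodup := by
        refine List.nodup_cons.mpr ⟨?_, ?_⟩
        · simp only [PySem.List.dedup_eq_ofList, PySem.Set.mem_ofList]; exact hvu
        · simp only [PySem.List.dedup_eq_ofList]; exact PySem.Set.nodup_ofList _
      have hdperm : (PySem.List.dedup (v :: rest)).Perm (v :: PySem.List.dedup u) := by
        rw [List.perm_ext_iff_of_nodup hnd1 hnd2]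
        intro x
        simp only [PySem.List.dedup_eq_ofList, PySem.Set.mem_ofList, List.mem_cons, hrest,
          List.mem_append]
        constructor
        · rintro (h | h | h)
          · exact Or.inl h
          · exact Or.inl (htv x h)
          · exact Or.inr h
        · rintro (h | h)
          · exact Or.inl h
          · exact Or.inr (Or.inr h)
      rw [solutionAltLoop]
      simp only [← ht, hdrop]
      rw [ih u (by
            have : u.length ≤ rest.length := (List.dropWhile_sublist _).length_le
            simp only [List.length_cons] at hs; omega) hpu]
      rw [hdperm.countP_eq, List.countP_cons]
      have hpredu : (PySem.List.dedup u).countP (fun x => decide (x ≤ ((v :: rest).count x : Int)))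
          = (PySem.List.dedup u).countP (fun x => decide (x ≤ (u.count x : Int))) := by
        apply List.countP_congr
        intro x hx
        simp only [PySem.List.dedup_eq_ofList, PySem.Set.mem_ofList] at hx
        rw [hcountu x hx]
      rw [hpredu]
      have hc : ((v :: rest).count v : Int) = 1 + (t.length : Int) := by
        rw [hcountv]; push_cast; ring
      by_cases hge : (1 + (t.length : Int)) ≥ v
      · have : decide (v ≤ ((v :: rest).count v : Int)) = true := by
          rw [hc, decide_eq_true_eq]; omega
        rw [if_pos hge]
        simp only [this]
        push_cast
        ring
      · have : decide (v ≤ ((v :: rest).count v : Int)) = false := by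
          rw [hc, decide_eq_false_iff_not]; omega
        rw [if_neg hge]
        simp only [this]
        push_cast
        ring

-- ===== VERDICT (by name: the statement is the Claim_ definition above) =====
theorem solution_spec : Claim_equal_solution := by
  intro fears _
  unfold Spec_solution solution_alt
  have hpw : (PySem.List.sorted fears (fun x => x) false).Pairwise (· ≤ ·) :=
    PySem.List.sorted_pairwise fears (fun x => x)
  rw [solution_eq_countP,
      altLoop_eq_countP (PySem.List.sorted fears (fun x => x) false).length _ le_rfl hpw 0]
  have hperm : (PySem.List.sorted fears (fun x => x) false).Perm fears :=
    PySem.List.sorted_perm fears (fun x => x) false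
  have hpred : (fun v : Int => decide (v ≤ ((PySem.List.sorted fears (fun x => x) false).count v : Int)))
      = fun v : Int => decide (v ≤ (fears.count v : Int)) := by
    funext v; rw [hperm.count_eq]
  have hdperm : (PySem.List.dedup (PySem.List.sorted fears (fun x => x) false)).Perm
      (PySem.Set.ofList fears) := by
    rw [List.perm_ext_iff_of_nodup ?_ (PySem.Set.nodup_ofList fears)]
    · intro x
      simp [PySem.Set.mem_ofList, PySem.List.mem_sorted]
    · simp only [PySem.List.dedup_eq_ofList]
      exact PySem.Set.nodup_ofList _
  rw [hpred, hdperm.countP_eq]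
  ring
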